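-- pv_equiv track=rewrite | github.com/Samudralavikas2005/AI-FRIDAY | study_planner/topic_fetcher.py | prioritize_and_organize_topics
-- ===== SOURCE A (Python) =====
-- def prioritize_and_organize_topics(topics, subject_name):
--     if not topics:
--         return []
--
--     priority_order = [
--         ('introduction', 1), ('overview', 1), ('getting started', 1),
--         ('basic', 2), ('fundamental', 2), ('beginner', 2),
--         ('advanced', 3), ('expert', 3), ('professional', 3)
--     ]
--
--     def get_topic_priority(topic):
--         topic_lower = topic.lower()
--         for pattern, priority in priority_order:
--             if pattern in topic_lower:
--                 return priority
--         return 2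
--
--     sorted_topics = sorted(topics, key=lambda x: (get_topic_priority(x), x))
--     return sorted_topics[:12]
-- ===== SOURCE B (Python) =====
-- def prioritize_and_organize_topics(topics, subject_name):
--     if not topics:
--         return []
--
--     bucket1, bucket2, bucket3 = [], [], []
--     for t in topics:
--         tl = t.lower()
--         if 'introduction' in tl or 'overview' in tl or 'getting started' in tl:
--             bucket1.append(t)
--         elif 'basic' in tl or 'fundamental' in tl or 'beginner' in tl:
--             bucket2.append(t)
--         elif 'advanced' in tl or 'expert' in tl or 'professional' in tl:
--             bucket3.append(t)
--         else:
--             bucket2.append(t)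
--
--     result = sorted(bucket1) + sorted(bucket2) + sorted(bucket3)
--     return result[:12]
-- ===== Notes on version B (the rewrite author's own statement) =====
-- stated objective: faster
-- what changed: Replaces the single sort keyed by a (priority, topic) tuple with a one-pass partition of the topics into three priority buckets followed by a plain alphabetical sort of each bucket and concatenation, so each topic's keyword priority is computed once in the partition pass and no composite key tuples are built or compared during sorting.
import Mathlib
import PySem

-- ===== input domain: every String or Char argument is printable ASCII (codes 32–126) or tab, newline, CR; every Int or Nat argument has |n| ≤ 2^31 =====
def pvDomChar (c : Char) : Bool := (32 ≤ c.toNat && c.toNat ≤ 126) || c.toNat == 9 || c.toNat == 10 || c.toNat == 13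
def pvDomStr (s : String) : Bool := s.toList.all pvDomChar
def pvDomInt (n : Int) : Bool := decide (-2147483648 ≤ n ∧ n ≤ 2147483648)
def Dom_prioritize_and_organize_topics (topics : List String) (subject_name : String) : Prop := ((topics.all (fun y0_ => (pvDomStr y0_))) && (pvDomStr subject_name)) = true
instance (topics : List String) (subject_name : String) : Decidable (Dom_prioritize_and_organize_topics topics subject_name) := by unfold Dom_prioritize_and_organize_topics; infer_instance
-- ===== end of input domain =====

-- B replaces A's single sort keyed by (priority, topic) with a one-pass partition into
-- three priority buckets, a plain alphabetical sort of each bucket, and concatenation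
-- (objective: faster — priority computed once per topic, no composite key comparisons).

-- ===== PORT A =====
def pvPriorityOrder : List (String × Int) :=
  [("introduction", 1), ("overview", 1), ("getting started", 1),
   ("basic", 2), ("fundamental", 2), ("beginner", 2),
   ("advanced", 3), ("expert", 3), ("professional", 3)]

-- the 'for pattern, priority in priority_order' loop with its early return
def pvPrioLoop (tl : String) : List (String × Int) → Int
  | [] => 2
  | (pat, pr) :: rest => if PySem.Str.isIn pat tl then pr else pvPrioLoop tl rest

def pvGetTopicPriority (topic : String) : Int :=
  pvPrioLoop (PySem.Str.lower topic) pvPriorityOrder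

def prioritize_and_organize_topics (topics : List String) (subject_name : String) : List String :=
  if topics = [] then []
  else
    let sorted_topics := PySem.List.sorted2 topics pvGetTopicPriority (fun x => x) false
    PySem.List.slice sorted_topics none (some 12)

-- ===== PORT B =====
def pvCond1 (tl : String) : Bool :=
  PySem.Str.isIn "introduction" tl || PySem.Str.isIn "overview" tl || PySem.Str.isIn "getting started" tl
def pvCond2 (tl : String) : Bool :=
  PySem.Str.isIn "basic" tl || PySem.Str.isIn "fundamental" tl || PySem.Str.isIn "beginner" tl
def pvCond3 (tl : String) : Bool :=
  PySem.Str.isIn "advanced" tl || PySem.Str.isIn "expert" tl || PySem.Str.isIn "professional" tl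

-- the loop body: route one topic into its bucket
def pvBucketStep (acc : List String × List String × List String) (t : String) :
    List String × List String × List String :=
  let tl := PySem.Str.lower t
  if pvCond1 tl then (acc.1 ++ [t], acc.2.1, acc.2.2)
  else if pvCond2 tl then (acc.1, acc.2.1 ++ [t], acc.2.2)
  else if pvCond3 tl then (acc.1, acc.2.1, acc.2.2 ++ [t])
  else (acc.1, acc.2.1 ++ [t], acc.2.2)

def prioritize_and_organize_topics_alt (topics : List String) (subject_name : String) : List String :=
  if topics = [] then []
  else
    let b := topics.foldl pvBucketStep ([], [], [])
    let result := PySem.List.sorted b.1 (fun x => x) false ++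
                  PySem.List.sorted b.2.1 (fun x => x) false ++
                  PySem.List.sorted b.2.2 (fun x => x) false
    PySem.List.slice result none (some 12)

-- ===== PRECONDITION & SPEC =====
def Spec_prioritize_and_organize_topics (topics : List String) (subject_name : String) (out : List String) : Prop := out = prioritize_and_organize_topics_alt topics subject_name
instance (topics : List String) (subject_name : String) (out : List String) : Decidable (Spec_prioritize_and_organize_topics topics subject_name out) := by unfold Spec_prioritize_and_organize_topics; infer_instance

-- ===== CLAIM (what is proved, stated in full; the proofs are below) =====
def Claim_equal_prioritize_and_organize_topics : Prop := ∀ (topics : List String) (subject_name : String), Dom_prioritize_and_organize_topics topics subject_name → Spec_prioritize_and_organize_topics topics subject_name (prioritize_and_organize_topics topics subject_name)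

-- ===== LEMMAS AND PROOFS =====

-- the priority is always 1, 2 or 3
theorem pvPrio_mem (x : String) :
    pvGetTopicPriority x = 1 ∨ pvGetTopicPriority x = 2 ∨ pvGetTopicPriority x = 3 := by
  unfold pvGetTopicPriority pvPriorityOrder
  simp only [pvPrioLoop]
  split_ifs <;> norm_num

-- A's first-match priority scan, phrased through B's three grouped conditions
theorem pvPrio_cond (x : String) :
    pvGetTopicPriority x =
      (if pvCond1 (PySem.Str.lower x) then 1
       else if pvCond2 (PySem.Str.lower x) then 2
       else if pvCond3 (PySem.Str.lower x) then 3 else 2) := by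
  unfold pvGetTopicPriority pvPriorityOrder pvCond1 pvCond2 pvCond3
  simp only [pvPrioLoop]
  split_ifs <;> simp_all

-- proof-only composite key: a priority digit prepended to the topic's characters,
-- so that lexicographic List Char order is exactly A's (priority, topic) order
def pvDigit (i : Int) : Char := if i = 1 then '1' else if i = 2 then '2' else '3'
def pvKey (x : String) : String := String.ofList (pvDigit (pvGetTopicPriority x) :: x.toList)

theorem pvKey_inj : Function.Injective pvKey := by
  intro a b h
  unfold pvKey at h
  have h' := congrArg String.toList h
  simp only [String.toList_ofList, List.cons.injEq] at h'
  exact String.toList_inj.mp h'.2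

theorem pvKey_lt_iff (a b : String) :
    pvKey a < pvKey b ↔
      (pvGetTopicPriority a < pvGetTopicPriority b ∨
        (pvGetTopicPriority a = pvGetTopicPriority b ∧ a < b)) := by
  rcases pvPrio_mem a with ha | ha | ha <;> rcases pvPrio_mem b with hb | hb | hb <;>
    simp [pvKey, pvDigit, ha, hb, List.cons_lt_cons_iff, String.lt_iff_toList_lt,
      String.toList_ofList]

-- A's lexicographic comparison equals strict comparison of the composite keys
theorem pvLt_eq (a b : String) :
    (decide (pvGetTopicPriority a < pvGetTopicPriority b) ||
      (!decide (pvGetTopicPriority b < pvGetTopicPriority a) && decide (a < b))) =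
      decide (pvKey a < pvKey b) := by
  by_cases hk : pvKey a < pvKey b
  · rw [decide_eq_true hk]
    rw [pvKey_lt_iff] at hk
    rcases hk with h | ⟨h1, h2⟩
    · simp [decide_eq_true h]
    · simp [h1, String.lt_iff_toList_lt.mp h2]
  · rw [decide_eq_false hk]
    rw [pvKey_lt_iff] at hk
    simp only [not_or, not_and] at hk
    obtain ⟨h1, h2⟩ := hk
    by_cases h3 : pvGetTopicPriority b < pvGetTopicPriority a
    · simp [decide_eq_false h1, decide_eq_true h3]
    · have hpe : pvGetTopicPriority a = pvGetTopicPriority b := by omega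
      simp [decide_eq_false h1]
      exact fun _ => String.le_iff_toList_le.mp (not_lt.mp (h2 hpe))

-- A's sorted2 by (priority, x) is sorting by the composite key
theorem pvSorted2_eq (xs : List String) :
    PySem.List.sorted2 xs pvGetTopicPriority (fun x => x) false =
      PySem.List.sorted xs pvKey false := by
  rw [PySem.List.sorted_eq_foldl_insertBy]
  show List.foldl (fun acc x => PySem.List.insertBy
    (fun a b => decide (pvGetTopicPriority a < pvGetTopicPriority b) ||
      (!decide (pvGetTopicPriority b < pvGetTopicPriority a) && decide (a < b))) x acc) [] xs = _
  rw [show (fun a b : String => decide (pvGetTopicPriority a < pvGetTopicPriority b) ||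
      (!decide (pvGetTopicPriority b < pvGetTopicPriority a) && decide (a < b)))
    = fun a b => decide (pvKey a < pvKey b) from funext fun a => funext fun b => pvLt_eq a b]

-- B's bucket membership predicates
def pvQ1 (t : String) : Bool := pvCond1 (PySem.Str.lower t)
def pvQ2 (t : String) : Bool :=
  !pvCond1 (PySem.Str.lower t) && (pvCond2 (PySem.Str.lower t) || !pvCond3 (PySem.Str.lower t))
def pvQ3 (t : String) : Bool :=
  !pvCond1 (PySem.Str.lower t) && !pvCond2 (PySem.Str.lower t) && pvCond3 (PySem.Str.lower t)

theorem pvQ1_iff (t : String) : pvQ1 t = true ↔ pvGetTopicPriority t = 1 := by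
  have h := pvPrio_cond t
  unfold pvQ1
  cases h1 : pvCond1 (PySem.Str.lower t) <;>
    cases h2 : pvCond2 (PySem.Str.lower t) <;>
      cases h3 : pvCond3 (PySem.Str.lower t) <;> simp_all

theorem pvQ2_iff (t : String) : pvQ2 t = true ↔ pvGetTopicPriority t = 2 := by
  have h := pvPrio_cond t
  unfold pvQ2
  cases h1 : pvCond1 (PySem.Str.lower t) <;>
    cases h2 : pvCond2 (PySem.Str.lower t) <;>
      cases h3 : pvCond3 (PySem.Str.lower t) <;> simp_all

theorem pvQ3_iff (t : String) : pvQ3 t = true ↔ pvGetTopicPriority t = 3 := by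
  have h := pvPrio_cond t
  unfold pvQ3
  cases h1 : pvCond1 (PySem.Str.lower t) <;>
    cases h2 : pvCond2 (PySem.Str.lower t) <;>
      cases h3 : pvCond3 (PySem.Str.lower t) <;> simp_all

-- the bucket loop is filtering with pvQ1/pvQ2/pvQ3
theorem pvBuckets (l : List String) (acc : List String × List String × List String) :
    l.foldl pvBucketStep acc =
      (acc.1 ++ l.filter pvQ1, acc.2.1 ++ l.filter pvQ2, acc.2.2 ++ l.filter pvQ3) := by
  induction l generalizing acc with
  | nil => simp
  | cons x xs ih =>
    rw [List.foldl_cons, ih]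
    unfold pvBucketStep pvQ1 pvQ2 pvQ3
    cases h1 : pvCond1 (PySem.Str.lower x) <;>
      cases h2 : pvCond2 (PySem.Str.lower x) <;>
        cases h3 : pvCond3 (PySem.Str.lower x) <;> simp_all

-- the three filters partition the list (as a permutation)
theorem pvFilters_perm (l : List String) :
    (l.filter pvQ1 ++ (l.filter pvQ2 ++ l.filter pvQ3)).Perm l := by
  induction l with
  | nil => simp
  | cons x xs ih =>
    rcases pvPrio_mem x with h | h | h
    · have q1 : pvQ1 x = true := (pvQ1_iff x).mpr h
      have q2 : pvQ2 x = false := by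
        cases hq : pvQ2 x
        · rfl
        · exact absurd ((pvQ2_iff x).mp hq ▸ h) (by omega)
      have q3 : pvQ3 x = false := by
        cases hq : pvQ3 x
        · rfl
        · exact absurd ((pvQ3_iff x).mp hq ▸ h) (by omega)
      simpa [List.filter_cons, q1, q2, q3] using ih.cons x
    · have q1 : pvQ1 x = false := by
        cases hq : pvQ1 x
        · rfl
        · exact absurd ((pvQ1_iff x).mp hq ▸ h) (by omega)
      have q2 : pvQ2 x = true := (pvQ2_iff x).mpr h
      have q3 : pvQ3 x = false := by
        cases hq : pvQ3 x
        · rfl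
        · exact absurd ((pvQ3_iff x).mp hq ▸ h) (by omega)
      simp only [List.filter_cons, q1, q2, q3, Bool.false_eq_true, ite_false]
      exact (List.perm_middle).trans (ih.cons x)
    · have q1 : pvQ1 x = false := by
        cases hq : pvQ1 x
        · rfl
        · exact absurd ((pvQ1_iff x).mp hq ▸ h) (by omega)
      have q2 : pvQ2 x = false := by
        cases hq : pvQ2 x
        · rfl
        · exact absurd ((pvQ2_iff x).mp hq ▸ h) (by omega)
      have q3 : pvQ3 x = true := (pvQ3_iff x).mpr h
      simp only [List.filter_cons, q1, q2, q3, Bool.false_eq_true, ite_true, ite_false]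
      have hm : (xs.filter pvQ1 ++ (xs.filter pvQ2 ++ x :: xs.filter pvQ3)).Perm
          (x :: (xs.filter pvQ1 ++ (xs.filter pvQ2 ++ xs.filter pvQ3))) := by
        simpa using List.perm_middle (l₁ := xs.filter pvQ1 ++ xs.filter pvQ2)
          (l₂ := xs.filter pvQ3) (a := x)
      exact hm.trans (ih.cons x)

-- key-monotone across buckets: strictly smaller priority means strictly smaller key
theorem pvKey_le_of_prio_lt {a b : String}
    (h : pvGetTopicPriority a < pvGetTopicPriority b) : pvKey a ≤ pvKey b :=
  le_of_lt ((pvKey_lt_iff a b).mpr (Or.inl h))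

theorem pvKey_le_of_prio_eq_le {a b : String}
    (hp : pvGetTopicPriority a = pvGetTopicPriority b) (hab : a ≤ b) : pvKey a ≤ pvKey b := by
  rcases lt_or_eq_of_le hab with hlt | heq
  · exact le_of_lt ((pvKey_lt_iff a b).mpr (Or.inr ⟨hp, hlt⟩))
  · exact heq ▸ le_rfl

-- the concatenation of the three sorted buckets is pairwise key-ordered
theorem pvE_pairwise (l : List String) :
    List.Pairwise (fun a b => pvKey a ≤ pvKey b)
      (PySem.List.sorted (l.filter pvQ1) (fun x => x) false ++
        (PySem.List.sorted (l.filter pvQ2) (fun x => x) false ++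
          PySem.List.sorted (l.filter pvQ3) (fun x => x) false)) := by
  have prio_of_mem : ∀ (q : String → Bool) (i : Int),
      (∀ t : String, q t = true ↔ pvGetTopicPriority t = i) →
      ∀ x ∈ PySem.List.sorted (l.filter q) (fun x => x) false, pvGetTopicPriority x = i := by
    intro q i hq x hx
    rw [PySem.List.mem_sorted] at hx
    exact (hq x).mp (List.of_mem_filter hx)
  have within : ∀ (q : String → Bool) (i : Int),
      (∀ t : String, q t = true ↔ pvGetTopicPriority t = i) →
      List.Pairwise (fun a b => pvKey a ≤ pvKey b)
        (PySem.List.sorted (l.filter q) (fun x => x) false) := by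
    intro q i hq
    refine (PySem.List.sorted_pairwise (l.filter q) (fun x => x)).imp_of_mem ?_
    intro a b ha hb hab
    exact pvKey_le_of_prio_eq_le
      ((prio_of_mem q i hq a ha).trans (prio_of_mem q i hq b hb).symm) hab
  rw [List.pairwise_append]
  refine ⟨within pvQ1 1 pvQ1_iff, ?_, ?_⟩
  · rw [List.pairwise_append]
    refine ⟨within pvQ2 2 pvQ2_iff, within pvQ3 3 pvQ3_iff, ?_⟩
    intro a ha b hb
    exact pvKey_le_of_prio_lt (by
      rw [prio_of_mem pvQ2 2 pvQ2_iff a ha, prio_of_mem pvQ3 3 pvQ3_iff b hb]; omega)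
  · intro a ha b hb
    have h1 := prio_of_mem pvQ1 1 pvQ1_iff a ha
    rcases List.mem_append.mp hb with hb | hb
    · exact pvKey_le_of_prio_lt (by
        rw [h1, prio_of_mem pvQ2 2 pvQ2_iff b hb]; omega)
    · exact pvKey_le_of_prio_lt (by
        rw [h1, prio_of_mem pvQ3 3 pvQ3_iff b hb]; omega)

-- the central equality: A's keyed sort equals B's bucket decomposition
set_option maxHeartbeats 1000000 in
theorem pvMain (l : List String) :
    PySem.List.sorted2 l pvGetTopicPriority (fun x => x) false =
      PySem.List.sorted (l.filter pvQ1) (fun x => x) false ++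
        (PySem.List.sorted (l.filter pvQ2) (fun x => x) false ++
          PySem.List.sorted (l.filter pvQ3) (fun x => x) false) := by
  rw [pvSorted2_eq]
  have hE : (PySem.List.sorted (l.filter pvQ1) (fun x => x) false ++
      (PySem.List.sorted (l.filter pvQ2) (fun x => x) false ++
        PySem.List.sorted (l.filter pvQ3) (fun x => x) false)).Perm l :=
    ((PySem.List.sorted_perm (l.filter pvQ1) (fun x => x) false).append
      ((PySem.List.sorted_perm (l.filter pvQ2) (fun x => x) false).append
        (PySem.List.sorted_perm (l.filter pvQ3) (fun x => x) false))).trans (pvFilters_perm l)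
  exact PySem.List.eq_of_perm_of_pairwise_le_of_injective pvKey pvKey_inj
    ((PySem.List.sorted_perm l pvKey false).trans hE.symm)
    (PySem.List.sorted_pairwise l pvKey) (pvE_pairwise l)

-- ===== VERDICT (by name: the statement is the Claim_ definition above) =====
theorem prioritize_and_organize_topics_spec : Claim_equal_prioritize_and_organize_topics := by
  intro topics subject_name _
  unfold Spec_prioritize_and_organize_topics
  unfold prioritize_and_organize_topics prioritize_and_organize_topics_alt
  by_cases h : topics = []
  · simp [h]
  · simp only [h, ite_false]
    rw [pvBuckets topics ([], [], [])]
    simp only [List.nil_append]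
    rw [pvMain topics, List.append_assoc]
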